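-- pv_equiv track=rewrite | github.com/frcroth/advent-of-code-2020 | 10/adapters.py | brute_force_part
-- ===== SOURCE A (Python) =====
-- import itertools
--
-- def brute_force_part(part):
--     # given a list of numbers, max difference 2
--     if len(part) < 3:
--         return 1
--     if len(part) == 3:
--         return 2
--     if len(part) == 4:
--         return 4  # make use of knowledge that they are at most 1 a part in every part
--     # remove edges
--     part.pop(0)
--     part.pop(len(part)-1)
--
--     combinations = get_combinations(part)
--
--     # test combinations
--     count = 0
--     for combination in combinations:
--         if len(combination) > 1:
--             max_diff = max([combination[i+1]-combination[i]
--                             for i in range(len(combination)-1) if combination[i] < combination[i+1]])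
--         else:
--             max_diff = 0
--         if max_diff <= 3:
--             count += 1
--     return count
--
-- def get_combinations(arr):
--     combinations = []
--     for i in range(1, len(arr)+1):
--         combinations += list(itertools.combinations(arr, i))
--     return [list(element) for element in combinations]
-- ===== SOURCE B (Python) =====
-- def brute_force_part(part):
--     # O(n^2) DP over the interior instead of enumerating all 2^n subsets.
--     # (Unlike A, this does not mutate `part`.)
--     if len(part) < 3:
--         return 1
--     if len(part) == 3:
--         return 2
--     if len(part) == 4:
--         return 4
--     interior = part[1:-1]
--     # acc[k] = (value, number of valid subsequences of the current suffix
--     #           starting at that value), built back-to-front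
--     acc = []
--     for x in reversed(interior):
--         acc = [(x, 1 + sum(c for y, c in acc if y - x <= 3))] + acc
--     return sum(c for _, c in acc)
-- ===== Notes on version B (the rewrite author's own statement) =====
-- stated objective: faster
-- what changed: Replaces A's enumeration of all 2^n non-empty interior subsets (testing each subset's max adjacent difference) by an O(n^2) back-to-front counting DP over the interior: for each position it counts the valid subsequences starting there as 1 plus the counts of reachable later positions, and sums them.
-- outside the precondition, e.g. on brute_force_part([1, 2, 2, 3, 4, 5, 6]): A raises ValueError, B returns 31
import Mathlib
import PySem

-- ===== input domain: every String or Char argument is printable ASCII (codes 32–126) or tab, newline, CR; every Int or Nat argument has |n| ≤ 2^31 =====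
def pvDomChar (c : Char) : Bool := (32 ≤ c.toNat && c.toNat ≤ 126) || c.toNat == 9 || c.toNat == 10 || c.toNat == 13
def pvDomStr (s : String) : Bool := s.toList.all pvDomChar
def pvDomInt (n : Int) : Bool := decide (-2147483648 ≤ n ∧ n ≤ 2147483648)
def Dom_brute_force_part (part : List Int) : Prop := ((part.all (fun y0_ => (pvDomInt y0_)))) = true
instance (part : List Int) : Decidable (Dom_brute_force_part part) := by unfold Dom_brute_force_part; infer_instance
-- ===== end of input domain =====

-- B replaces A's enumeration of all 2^n interior subsets by an O(n^2) back-to-front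
-- counting DP over the interior (A also mutates `part` by popping its edges; B does not —
-- the equivalence proved here is about the return value).

-- ===== PORT A =====
-- itertools.combinations(arr, k), in itertools' order (hand-ported, exact: combinations
-- of a list are emitted in lexicographic order of their index tuples)
def pvCombos : Nat → List Int → List (List Int)
  | 0, _ => [[]]
  | _+1, [] => []
  | k+1, x :: xs => ((pvCombos k xs).map (fun c => x :: c)) ++ pvCombos (k+1) xs

-- get_combinations: for i in range(1, len(arr)+1): combinations += combinations(arr, i)
def get_combinations (arr : List Int) : List (List Int) :=
  (PySem.List.pyRange 1 ((arr.length : Int) + 1) 1).foldl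
    (fun acc i => acc ++ pvCombos i.toNat arr) []

-- the body computing max_diff for one combination; Python's max([]) raises ValueError:
-- PySem.List.max? is none exactly there, the .getD 0 branch is excluded by Pre_
def pvMaxDiff (c : List Int) : Int :=
  if 1 < c.length then
    (PySem.List.max?
      ((List.range (c.length - 1)).filterMap (fun i =>
        if c.getD i 0 < c.getD (i+1) 0 then some (c.getD (i+1) 0 - c.getD i 0) else none))
      (fun y => y)).getD 0
  else 0

def brute_force_part (part : List Int) : Int :=
  if part.length < 3 then 1
  else if part.length = 3 then 2
  else if part.length = 4 then 4
  else
    -- part.pop(0); part.pop(len(part)-1)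
    let t := (part.drop 1).dropLast
    (get_combinations t).foldl
      (fun count c => if pvMaxDiff c ≤ 3 then count + 1 else count) 0

-- ===== PORT B =====
-- one step of B's loop: acc = [(x, 1 + sum(c for y, c in acc if y - x <= 3))] + acc
def pvStep (acc : List (Int × Int)) (x : Int) : List (Int × Int) :=
  (x, 1 + ((acc.filter (fun p => p.1 - x ≤ 3)).map (fun p => p.2)).sum) :: acc

def brute_force_part_alt (part : List Int) : Int :=
  if part.length < 3 then 1
  else if part.length = 3 then 2
  else if part.length = 4 then 4
  else
    let interior := PySem.List.slice part (some 1) (some (-1))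
    let acc := interior.reverse.foldl pvStep []
    ((acc.map (fun p => p.2)).sum)

-- ===== PRECONDITION & SPEC =====
-- Pre_ excludes exactly the inputs on which A raises ValueError (max of an empty list):
-- with ≥ 5 elements, any non-increasing pair of the interior is itself a combination
-- whose diff-comprehension is empty; A returns normally iff the interior is strictly
-- increasing (or the list is short enough for the hard-coded branches).
def Pre_brute_force_part (part : List Int) : Prop :=
  part.length < 5 ∨ ((part.drop 1).dropLast).Pairwise (· < ·)
instance (part : List Int) : Decidable (Pre_brute_force_part part) := by
  unfold Pre_brute_force_part; infer_instance
def pvWitness_brute_force_part : List Int := [1, 2, 3, 5, 6, 7, 8]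
def Spec_brute_force_part (part : List Int) (out : Int) : Prop := out = brute_force_part_alt part
instance (part : List Int) (out : Int) : Decidable (Spec_brute_force_part part out) := by
  unfold Spec_brute_force_part; infer_instance

-- ===== CLAIM (what is proved, stated in full; the proofs are below) =====
def Claim_equal_brute_force_part : Prop := ∀ (part : List Int), Dom_brute_force_part part → Pre_brute_force_part part → Spec_brute_force_part part (brute_force_part part)

-- ===== LEMMAS AND PROOFS =====

-- `good c` = every adjacent difference of c is ≤ 3 (the property both programs count)
def pvGood : List Int → Bool
  | [] => true
  | [_] => true
  | x :: y :: ys => (decide (y - x ≤ 3)) && pvGood (y :: ys)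

-- number of good subsequences of x :: xs that start with x
def pvQ : Int → List Int → Int
  | _, [] => 1
  | x, y :: ys => pvQ x ys + (if y - x ≤ 3 then pvQ y ys else 0)

-- the value B's accumulator reaches after consuming the whole list
def pvAccList : List Int → List (Int × Int)
  | [] => []
  | x :: xs => (x, pvQ x xs) :: pvAccList xs

-- the adjacent differences of a list
def pvAdjDiffs : List Int → List Int
  | x :: y :: ys => (y - x) :: pvAdjDiffs (y :: ys)
  | _ => []

theorem pvQ_eq_countP (xs : List Int) : ∀ (x : Int),
    ((xs.sublists'.countP (fun c => pvGood (x :: c)) : Int)) = pvQ x xs := by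
  induction xs with
  | nil => intro x; simp [pvQ, pvGood]
  | cons y ys ih =>
    intro x
    rw [List.sublists'_cons, List.countP_append, List.countP_map]
    have h2 : (List.countP ((fun c => pvGood (x :: c)) ∘ List.cons y) ys.sublists' : Int)
        = if y - x ≤ 3 then pvQ y ys else 0 := by
      by_cases h : y - x ≤ 3
      · rw [if_pos h, ← ih y]
        congr 1
        apply List.countP_congr
        intro c _
        simp [Function.comp, pvGood, h]
      · rw [if_neg h]
        have : List.countP ((fun c => pvGood (x :: c)) ∘ List.cons y) ys.sublists' = 0 := by
          rw [List.countP_eq_zero]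
          intro c _
          simp [Function.comp, pvGood, h]
        rw [this]; rfl
    push_cast
    rw [h2, ih x, pvQ]

theorem pvP_cons (x : Int) (xs : List Int) :
    (((x :: xs).sublists'.countP pvGood : Int)) = (xs.sublists'.countP pvGood : Int) + pvQ x xs := by
  rw [List.sublists'_cons, List.countP_append, List.countP_map]
  push_cast
  rw [show (List.countP (pvGood ∘ List.cons x) xs.sublists' : Int)
      = (List.countP (fun c => pvGood (x :: c)) xs.sublists' : Int) by rfl, pvQ_eq_countP]

theorem pvAccList_sum (t : List Int) :
    ((pvAccList t).map (fun p => p.2)).sum = (t.sublists'.countP pvGood : Int) - 1 := by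
  induction t with
  | nil => simp [pvAccList, List.sublists', pvGood]
  | cons x xs ih => rw [pvAccList]; simp only [List.map_cons, List.sum_cons, ih, pvP_cons]; ring

theorem pvStep_accList (x : Int) (xs : List Int) :
    pvStep (pvAccList xs) x = pvAccList (x :: xs) := by
  rw [pvStep, pvAccList]
  congr 1
  have key : ∀ (ys : List Int) (z : Int),
      1 + (((pvAccList ys).filter (fun p => p.1 - z ≤ 3)).map (fun p => p.2)).sum = pvQ z ys := by
    intro ys
    induction ys with
    | nil => intro z; simp [pvAccList, pvQ]
    | cons y ys ih =>
      intro z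
      rw [pvAccList, pvQ]
      by_cases h : y - z ≤ 3
      · simp only [List.filter_cons, decide_eq_true_eq, h, if_pos, List.map_cons,
          List.sum_cons, ← ih z, ← ih y]
        simp
        ring
      · simp only [List.filter_cons, decide_eq_true_eq, h, ← ih z]
        simp
  exact (Prod.ext rfl (key xs x))

theorem pvFold_accList (t : List Int) : t.reverse.foldl pvStep [] = pvAccList t := by
  induction t with
  | nil => rfl
  | cons x xs ih => rw [List.reverse_cons, List.foldl_append, ih, List.foldl_cons, List.foldl_nil,
      pvStep_accList]

-- pvCombos k gives [] past the length
theorem pvCombos_eq_nil (xs : List Int) : ∀ k, xs.length < k → pvCombos k xs = [] := by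
  induction xs with
  | nil => intro k hk; match k, hk with | k+1, _ => rfl
  | cons x xs ih =>
    intro k hk
    match k, hk with
    | k+1, hk =>
      rw [pvCombos]
      have h1 : xs.length < k := by simpa using hk
      rw [ih k h1, ih (k+1) (Nat.lt_succ_of_lt h1)]
      rfl

theorem pvCombos_sublist (xs : List Int) : ∀ k c, c ∈ pvCombos k xs → c.Sublist xs := by
  induction xs with
  | nil =>
    intro k c hc
    match k with
    | 0 => simp [pvCombos] at hc; simp [hc]
    | k+1 => simp [pvCombos] at hc
  | cons x xs ih =>
    intro k c hc
    match k with
    | 0 => simp [pvCombos] at hc; simp [hc]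
    | k+1 =>
      rw [pvCombos, List.mem_append] at hc
      rcases hc with hc | hc
      · obtain ⟨c', hc', rfl⟩ := List.mem_map.mp hc
        exact List.Sublist.cons₂ x (ih k c' hc')
      · exact List.Sublist.cons x (ih (k+1) c hc)

-- Σ_{k=0}^{|xs|} countP p (pvCombos k xs) = countP p xs.sublists'
theorem pvCombos_sum (xs : List Int) : ∀ (p : List Int → Bool),
    ((List.range (xs.length + 1)).map (fun k => (pvCombos k xs).countP p)).sum
      = xs.sublists'.countP p := by
  induction xs with
  | nil => intro p; simp [pvCombos, List.sublists']
  | cons x xs ih =>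
    intro p
    rw [List.range_succ_eq_map]
    simp only [List.map_cons, List.map_map, List.sum_cons]
    have step : ∀ k, (pvCombos (k+1) (x :: xs)).countP p
        = (pvCombos k xs).countP (fun c => p (x :: c)) + (pvCombos (k+1) xs).countP p := by
      intro k
      rw [pvCombos, List.countP_append, List.countP_map]
      rfl
    have hsplit :
        ((List.range (xs.length + 1)).map ((fun k => (pvCombos k (x :: xs)).countP p) ∘ (· + 1))).sum
          = ((List.range (xs.length + 1)).map (fun k => (pvCombos k xs).countP (fun c => p (x :: c)))).sum
            + ((List.range (xs.length + 1)).map (fun k => (pvCombos (k+1) xs).countP p)).sum := by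
      rw [← List.sum_map_add]
      congr 1
      apply List.map_congr_left
      intro k _
      simpa using step k
    rw [List.length_cons, hsplit, ih]
    have tail0 : (pvCombos (xs.length + 1) xs).countP p = 0 := by
      rw [pvCombos_eq_nil xs (xs.length + 1) (Nat.lt_succ_self _)]; rfl
    have hL : ((List.range (xs.length + 1)).map (fun k => (pvCombos (k+1) xs).countP p)).sum
        = ((List.range xs.length).map (fun k => (pvCombos (k+1) xs).countP p)).sum := by
      rw [List.range_succ]; simp [tail0]
    have hR : ((List.range (xs.length + 1)).map (fun k => (pvCombos k xs).countP p)).sum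
        = (pvCombos 0 xs).countP p
          + ((List.range xs.length).map (fun k => (pvCombos (k+1) xs).countP p)).sum := by
      rw [List.range_succ_eq_map]
      simp only [List.map_cons, List.sum_cons, List.map_map]
      rfl
    have h00 : (pvCombos 0 (x :: xs)).countP p = (pvCombos 0 xs).countP p := by
      simp [pvCombos]
    rw [List.sublists'_cons, List.countP_append, List.countP_map]
    have hihc : ((List.range (xs.length + 1)).map (fun k => (pvCombos k xs).countP p)).sum
        = xs.sublists'.countP p := ih p
    have hcomp : List.countP (p ∘ List.cons x) xs.sublists'
        = List.countP (fun c => p (x :: c)) xs.sublists' := rfl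
    omega

-- the index comprehension of A computes the filtered adjacent differences
theorem pvFilterMap_adj (c : List Int) (hc : c.Pairwise (· < ·)) :
    (List.range (c.length - 1)).filterMap (fun i =>
        if c.getD i 0 < c.getD (i+1) 0 then some (c.getD (i+1) 0 - c.getD i 0) else none)
      = pvAdjDiffs c := by
  induction c with
  | nil => rfl
  | cons x xs ih =>
    match xs, hc with
    | [], _ => rfl
    | y :: ys, hc =>
      have hxy : x < y := (List.pairwise_cons.mp hc).1 y (by simp)
      have htail := (List.pairwise_cons.mp hc).2
      rw [pvAdjDiffs]
      have hlen : (x :: y :: ys).length - 1 = ((y :: ys).length - 1) + 1 := by simp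
      rw [hlen, List.range_succ_eq_map, List.filterMap_cons, List.filterMap_map]
      simp only [List.getD_cons_zero, List.getD_cons_succ]
      rw [if_pos hxy]
      rw [← ih htail]
      rfl

theorem pvGood_iff_all (c : List Int) : pvGood c = true ↔ ∀ d ∈ pvAdjDiffs c, d ≤ 3 := by
  induction c with
  | nil => simp [pvGood, pvAdjDiffs]
  | cons x xs ih =>
    match xs, ih with
    | [], _ => simp [pvGood, pvAdjDiffs]
    | y :: ys, ih =>
      rw [pvGood, pvAdjDiffs]
      simp only [Bool.and_eq_true, decide_eq_true_eq, List.mem_cons, ih]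
      constructor
      · rintro ⟨h1, h2⟩ d (rfl | hd)
        · exact h1
        · exact h2 d hd
      · intro h
        exact ⟨h _ (Or.inl rfl), fun d hd => h d (Or.inr hd)⟩

theorem pvMaxDiff_eq_good (c : List Int) (hc : c.Pairwise (· < ·)) :
    (decide (pvMaxDiff c ≤ 3)) = pvGood c := by
  rw [pvMaxDiff]
  by_cases hl : 1 < c.length
  · rw [if_pos hl, pvFilterMap_adj c hc]
    have hne : pvAdjDiffs c ≠ [] := by
      rcases c with _ | ⟨x, c⟩
      · simp at hl
      rcases c with _ | ⟨y, ys⟩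
      · simp at hl
      rw [pvAdjDiffs]; simp
    rcases hm : PySem.List.max? (pvAdjDiffs c) (fun y => y) with _ | m
    · exact absurd ((PySem.List.max?_eq_none_iff _ _).mp hm) hne
    · have hmem := PySem.List.max?_mem hm
      have hmax := PySem.List.max?_isMax hm
      simp only [Option.getD_some]
      by_cases h3 : m ≤ 3
      · have hg : pvGood c = true :=
          (pvGood_iff_all c).mpr (fun d hd => le_trans (hmax d hd) h3)
        simp [hg, h3]
      · have hg : pvGood c = false := by
          rw [← Bool.not_eq_true, pvGood_iff_all]
          intro hall
          exact h3 (hall m hmem)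
        simp [hg, h3]
  · rw [if_neg hl]
    match c with
    | [] => simp [pvGood]
    | [x] => simp [pvGood]
    | x :: y :: ys => exact absurd (by simp : 1 < (x :: y :: ys).length) hl

theorem pvSlice_interior (xs : List Int) :
    PySem.List.slice xs (some 1) (some (-1)) = (xs.drop 1).dropLast := by
  rcases xs with _ | ⟨x, xs⟩
  · rfl
  · simp only [PySem.List.slice, PySem.List.clampIdx]
    norm_num
    rw [if_neg (by omega : ¬ ((xs.length : Int) < 0)), List.dropLast_eq_take]

-- the main case: length ≥ 5, strictly increasing interior
theorem pvMain (part : List Int) (h5 : ¬ part.length < 3) (h3 : ¬ part.length = 3)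
    (h4 : ¬ part.length = 4) (hp : ((part.drop 1).dropLast).Pairwise (· < ·)) :
    brute_force_part part = brute_force_part_alt part := by
  rw [brute_force_part, brute_force_part_alt, if_neg h5, if_neg h3, if_neg h4,
    if_neg h5, if_neg h3, if_neg h4]
  simp only [pvSlice_interior, pvFold_accList, pvAccList_sum]
  set t := (part.drop 1).dropLast with ht
  have hfun : (fun (count : Int) c => if pvMaxDiff c ≤ 3 then count + 1 else count)
      = (fun (count : Int) c => if (fun c => decide (pvMaxDiff c ≤ 3)) c = true
          then count + 1 else count) := by
    funext count c; by_cases h : pvMaxDiff c ≤ 3 <;> simp [h]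
  rw [hfun, PySem.List.foldl_count_if, get_combinations,
    PySem.List.foldl_append_eq_flatMap, List.nil_append, PySem.List.pyRange_one]
  have hcast : ((t.length : Int) + 1 - 1).toNat = t.length := by omega
  rw [hcast, List.flatMap_map]
  have hfe : (fun a : Nat => pvCombos ((1 : Int) + (a : Int)).toNat t)
      = (fun k : Nat => pvCombos (k+1) t) := by
    funext k
    have h1k : ((1 : Int) + (k : Int)).toNat = k + 1 := by omega
    rw [h1k]
  rw [hfe]
  have hflat : ∀ (q : List Int → Bool),
      List.countP q ((List.range t.length).flatMap fun k => pvCombos (k+1) t)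
        = ((List.range t.length).map (fun k => (pvCombos (k+1) t).countP q)).sum := by
    intro q
    induction (List.range t.length) with
    | nil => rfl
    | cons k ks ih =>
      simp only [List.flatMap_cons, List.countP_append, List.map_cons, List.sum_cons, ih]
  rw [hflat]
  have hgood : ∀ k, (pvCombos (k+1) t).countP (fun c => decide (pvMaxDiff c ≤ 3))
      = (pvCombos (k+1) t).countP pvGood := by
    intro k
    apply List.countP_congr
    intro c hc
    have := pvMaxDiff_eq_good c (List.Pairwise.sublist (pvCombos_sublist t (k+1) c hc) hp)
    simp only [this]
  have hsum1 : ((List.range (t.length + 1)).map (fun k => (pvCombos k t).countP pvGood)).sum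
      = t.sublists'.countP pvGood := pvCombos_sum t pvGood
  have hsplit : ((List.range (t.length + 1)).map (fun k => (pvCombos k t).countP pvGood)).sum
      = 1 + ((List.range t.length).map (fun k => (pvCombos (k+1) t).countP pvGood)).sum := by
    rw [List.range_succ_eq_map]
    simp only [List.map_cons, List.sum_cons, List.map_map]
    congr 1
    · simp [pvCombos, pvGood]
  have hmapeq : (List.range t.length).map (fun k =>
        (pvCombos (k+1) t).countP (fun c => decide (pvMaxDiff c ≤ 3)))
      = (List.range t.length).map (fun k => (pvCombos (k+1) t).countP pvGood) :=
    List.map_congr_left (fun k _ => hgood k)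
  rw [hmapeq]
  omega

-- ===== VERDICT (by name: the statement is the Claim_ definition above) =====
theorem brute_force_part_spec : Claim_equal_brute_force_part := by
  intro part _ hpre
  unfold Spec_brute_force_part
  by_cases h5 : part.length < 3
  · rw [brute_force_part, brute_force_part_alt, if_pos h5, if_pos h5]
  by_cases h3 : part.length = 3
  · rw [brute_force_part, brute_force_part_alt, if_neg h5, if_pos h3, if_neg h5, if_pos h3]
  by_cases h4 : part.length = 4
  · rw [brute_force_part, brute_force_part_alt, if_neg h5, if_neg h3, if_pos h4,
      if_neg h5, if_neg h3, if_pos h4]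
  have hp : ((part.drop 1).dropLast).Pairwise (· < ·) := by
    rcases hpre with hl | hp
    · omega
    · exact hp
  exact pvMain part h5 h3 h4 hp
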